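-- pv_equiv track=rewrite | github.com/Mlynek4/WebOps_Pilot | backend/main.py | is_search_request
-- ===== SOURCE A (Python) =====
-- def is_search_request(user_text: str) -> bool:
--     lower = user_text.lower()
--     return any(keyword in lower for keyword in [
--         "find",
--         "show",
--         "where",
--         "search",
--         "look for",
--         "pricing",
--         "login",
--         "sign in",
--         "sign-in",
--         "download",
--     ])
-- ===== SOURCE B (Python) =====
-- _KEYWORDS = ("find", "show", "where", "search", "look for", "pricing",
--              "login", "sign in", "sign-in", "download")
--
-- def is_search_request(user_text: str) -> bool:
--     text = user_text.lower()
--     # one scan over positions: does any keyword start at position i?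
--     return any(text.startswith(kw, i)
--                for i in range(len(text))
--                for kw in _KEYWORDS)
-- ===== Notes on version B (the rewrite author's own statement) =====
-- stated objective: alternative
-- what changed: Replaced A's ten independent substring searches over the lowered text by a single positional scan that at each index tests whether any keyword starts there via startswith(kw, i).
import Mathlib
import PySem

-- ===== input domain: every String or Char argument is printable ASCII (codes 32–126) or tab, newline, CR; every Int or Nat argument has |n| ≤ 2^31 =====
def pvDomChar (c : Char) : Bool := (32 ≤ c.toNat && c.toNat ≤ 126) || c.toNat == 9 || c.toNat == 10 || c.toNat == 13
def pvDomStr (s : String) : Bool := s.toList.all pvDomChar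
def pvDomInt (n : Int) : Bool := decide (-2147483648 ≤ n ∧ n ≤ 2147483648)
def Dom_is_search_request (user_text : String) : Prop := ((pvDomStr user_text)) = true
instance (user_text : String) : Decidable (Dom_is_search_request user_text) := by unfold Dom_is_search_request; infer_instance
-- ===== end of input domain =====

-- ===== PORT A =====
-- B changes the strategy (positional scan with startswith instead of ten substring searches); same value, similar cost ("alternative").
def is_search_request (user_text : String) : Bool :=
  let lower := PySem.Str.lower user_text
  ([("find" : String), "show", "where", "search", "look for", "pricing",
    "login", "sign in", "sign-in", "download"]).any
    (fun kw => PySem.Str.isIn kw lower)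

-- ===== PORT B =====
def pvKeywords : List String :=
  ["find", "show", "where", "search", "look for", "pricing",
   "login", "sign in", "sign-in", "download"]

-- text.startswith(kw, i) is ported by hand as kw.toList.isPrefixOf (text.drop i): exact for 0 ≤ i ≤ len(text)
def is_search_request_alt (user_text : String) : Bool :=
  let text := PySem.Chars.lower user_text.toList
  (List.range text.length).any (fun i =>
    pvKeywords.any (fun kw => kw.toList.isPrefixOf (text.drop i)))

-- ===== PRECONDITION & SPEC =====
def Spec_is_search_request (user_text : String) (out : Bool) : Prop := out = is_search_request_alt user_text
instance (user_text : String) (out : Bool) : Decidable (Spec_is_search_request user_text out) := by unfold Spec_is_search_request; infer_instance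

-- ===== CLAIM (what is proved, stated in full; the proofs are below) =====
def Claim_equal_is_search_request : Prop := ∀ (user_text : String), Dom_is_search_request user_text → Spec_is_search_request user_text (is_search_request user_text)

-- ===== LEMMAS AND PROOFS =====

theorem pv_isIn_iff_exists_drop (kw s : List Char) (hkw : kw ≠ []) :
    PySem.Chars.isIn kw s = true ↔ ∃ i < s.length, kw <+: s.drop i := by
  rw [← PySem.Chars.exists_prefix_drop_iff_isIn]
  constructor
  · rintro ⟨j, hj⟩
    refine ⟨j, ?_, hj⟩
    by_contra h
    have : s.drop j = [] := List.drop_eq_nil_of_le (by omega)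
    rw [this] at hj
    exact hkw (List.prefix_nil.mp hj)
  · rintro ⟨i, _, hi⟩; exact ⟨i, hi⟩

-- ===== VERDICT (by name: the statement is the Claim_ definition above) =====
theorem is_search_request_spec : Claim_equal_is_search_request := by
  intro user_text _
  unfold Spec_is_search_request is_search_request is_search_request_alt
  rw [Bool.eq_iff_iff]
  simp only [List.any_eq_true, List.mem_range, List.isPrefixOf_iff_prefix,
    PySem.Str.isIn_eq, PySem.Str.toList_lower]
  constructor
  · rintro ⟨kw, hmem, hin⟩
    have hne : kw.toList ≠ [] := by fin_cases hmem <;> decide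
    obtain ⟨i, hlt, hpre⟩ := (pv_isIn_iff_exists_drop kw.toList _ hne).mp hin
    exact ⟨i, hlt, kw, hmem, hpre⟩
  · rintro ⟨i, hlt, kw, hmem, hpre⟩
    exact ⟨kw, hmem,
      (PySem.Chars.exists_prefix_drop_iff_isIn kw.toList _).mp ⟨i, hpre⟩⟩
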